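-- pv_equiv track=rewrite | github.com/sfectonir-Pfe/websitegenerator | backend/app.py | refine_query
-- ===== SOURCE A (Python) =====
-- def refine_query(query: str, page_name: str = None, folder_name: str = None) -> str:
--     """Amélioration de la requête avec contexte de la page/dossier"""
--     # Mots à exclure
--     stop_words = {'a', 'an', 'the', 'with', 'at', 'in', 'on', 'of', 'and', 'page', 'template'}
--
--     # Contextes spécifiques
--     context_keywords = {
--         'fruits': ['fruit', 'fresh', 'organic', 'apple', 'banana', 'orange'],
--         'voyages': ['travel', 'landscape', 'destination', 'tourist'],
--         'technologie': ['tech', 'computer', 'electronic', 'device']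
--     }
--
--     # Nettoyage de base
--     words = [word.lower() for word in query.split() if word.lower() not in stop_words]
--
--     # Ajout de contexte basé sur le nom de page/dossier
--     if page_name:
--         page_key = page_name.lower().split()[0]
--         if page_key in context_keywords:
--             words.extend(context_keywords[page_key])
--
--     if folder_name:
--         folder_key = folder_name.lower().split()[0]
--         if folder_key in context_keywords:
--             words.extend(context_keywords[folder_key])
--
--     # Éviter les doublons
--     unique_words = list(dict.fromkeys(words))
--
--     # Limiter à 5 mots max pour la requête API
--     return " ".join(unique_words[:5])
-- ===== SOURCE B (Python) =====
-- def refine_query(query: str, page_name: str = None, folder_name: str = None) -> str: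
--     """Recursive selection: keep the head of the candidate stream, filter its duplicates
--     out of the tail, recurse with a budget of 5 -- no seen-set, no dict.fromkeys."""
--     stop_words = {'a', 'an', 'the', 'with', 'at', 'in', 'on', 'of', 'and', 'page', 'template'}
--     context_keywords = {
--         'fruits': ['fruit', 'fresh', 'organic', 'apple', 'banana', 'orange'],
--         'voyages': ['travel', 'landscape', 'destination', 'tourist'],
--         'technologie': ['tech', 'computer', 'electronic', 'device']
--     }
--     stream = [w.lower() for w in query.split() if w.lower() not in stop_words]
--     for name in (page_name, folder_name):
--         if name:
--             stream += context_keywords.get(name.lower().split()[0], [])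
--
--     def pick(ws, k):
--         if k == 0 or not ws:
--             return []
--         h = ws[0]
--         return [h] + pick([w for w in ws[1:] if w != h], k - 1)
--
--     return " ".join(pick(stream, 5))
-- ===== Notes on version B (the rewrite author's own statement) =====
-- stated objective: alternative
-- what changed: Dedup-and-limit is done by a recursive head-selection: keep the head, filter all its duplicates out of the tail, recurse with a budget of 5 -- instead of A's dict.fromkeys ordered dedup followed by a [:5] slice.
import Mathlib
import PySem

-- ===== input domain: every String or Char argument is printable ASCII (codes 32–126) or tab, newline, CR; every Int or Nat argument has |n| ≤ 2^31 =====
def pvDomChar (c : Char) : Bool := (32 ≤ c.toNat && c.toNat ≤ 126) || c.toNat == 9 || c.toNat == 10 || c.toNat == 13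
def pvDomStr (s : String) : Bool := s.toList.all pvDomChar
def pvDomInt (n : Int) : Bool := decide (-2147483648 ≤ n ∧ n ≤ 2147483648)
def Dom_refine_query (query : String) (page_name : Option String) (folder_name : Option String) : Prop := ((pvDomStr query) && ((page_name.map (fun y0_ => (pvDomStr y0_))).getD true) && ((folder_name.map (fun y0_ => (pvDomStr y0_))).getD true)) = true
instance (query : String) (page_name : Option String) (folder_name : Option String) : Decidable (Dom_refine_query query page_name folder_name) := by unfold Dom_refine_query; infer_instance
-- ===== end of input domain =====

-- B replaces A's dict.fromkeys-dedupe-then-slice by a recursive head-selection with a budget of 5: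
-- keep the head, filter its duplicates out of the tail, recurse (objective: alternative, same cost).

-- ===== PORT A =====
-- module-level literal constants of the Python function (shared by both ports)
def pvStopWords : PySem.Set String :=
  PySem.Set.ofList ["a", "an", "the", "with", "at", "in", "on", "of", "and", "page", "template"]

def pvCtx : PySem.Dict String (List String) :=
  PySem.Dict.ofList
  [("fruits", ["fruit", "fresh", "organic", "apple", "banana", "orange"]),
   ("voyages", ["travel", "landscape", "destination", "tourist"]),
   ("technologie", ["tech", "computer", "electronic", "device"])]

-- A's `if name: key = name.lower().split()[0]; if key in context_keywords: words.extend(...)`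
-- (headD "": on Pre_-excluded inputs Python raises IndexError here; "" is not a pvCtx key)
def pvCtxAddA (name? : Option String) (words : List String) : List String :=
  match name? with
  | none => words
  | some s =>
    if s = "" then words
    else
      match PySem.Dict.get? pvCtx ((PySem.Str.split₀ (PySem.Str.lower s)).headD "") with
      | some ws => words ++ ws
      | none => words

def refine_query (query : String) (page_name : Option String) (folder_name : Option String) : String :=
  let words := ((PySem.Str.split₀ query).map PySem.Str.lower).filter
      (fun w => !(PySem.Set.contains pvStopWords w))
  let words := pvCtxAddA page_name words
  let words := pvCtxAddA folder_name words
  PySem.Str.join " " (PySem.List.slice (PySem.List.dedup words) none (some 5))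

-- ===== PORT B =====
-- Source B: `stream += context_keywords.get(name.lower().split()[0], [])` inside `if name:`
-- (headD "": on Pre_-excluded inputs Python raises IndexError here; "" is not a pvCtx key)
def pvExtra (name? : Option String) : List String :=
  match name? with
  | none => []
  | some s =>
    if s = "" then []
    else PySem.Dict.getD pvCtx ((PySem.Str.split₀ (PySem.Str.lower s)).headD "") []

-- Source B's `pick(ws, k)`: keep head, filter its duplicates out of the tail, recurse with budget
def pvPick : List String → Nat → List String
  | _, 0 => []
  | [], _ + 1 => []
  | h :: t, k + 1 => h :: pvPick (t.filter (fun w => w ≠ h)) k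
termination_by l _ => l.length
decreasing_by
  simp only [List.length_unattach, List.length_cons]
  exact Nat.lt_succ_of_le (le_trans (List.length_filter_le _ _) (by simp))

def refine_query_alt (query : String) (page_name : Option String) (folder_name : Option String) : String :=
  let stream := ((PySem.Str.split₀ query).map PySem.Str.lower).filter
      (fun w => !(PySem.Set.contains pvStopWords w))
  let stream := stream ++ pvExtra page_name
  let stream := stream ++ pvExtra folder_name
  PySem.Str.join " " (pvPick stream 5)

-- ===== PRECONDITION & SPEC =====
-- Pre_ excludes exactly the inputs where Python A raises IndexError: a page/folder name that is
-- truthy (non-empty) but whitespace-only, so that name.lower().split()[0] has no element.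
def pvNameOk (name? : Option String) : Bool :=
  match name? with
  | none => true
  | some s => s == "" || !(PySem.Str.split₀ (PySem.Str.lower s)).isEmpty

def Pre_refine_query (query : String) (page_name : Option String) (folder_name : Option String) : Prop :=
  pvNameOk page_name = true ∧ pvNameOk folder_name = true
instance (query : String) (page_name : Option String) (folder_name : Option String) : Decidable (Pre_refine_query query page_name folder_name) := by unfold Pre_refine_query; infer_instance

def pvWitness_refine_query : String × Option String × Option String := ("fresh red apple", some "fruits", none)

def Spec_refine_query (query : String) (page_name : Option String) (folder_name : Option String) (out : String) : Prop := out = refine_query_alt query page_name folder_name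
instance (query : String) (page_name : Option String) (folder_name : Option String) (out : String) : Decidable (Spec_refine_query query page_name folder_name out) := by unfold Spec_refine_query; infer_instance

-- ===== CLAIM (what is proved, stated in full; the proofs are below) =====
def Claim_equal_refine_query : Prop := ∀ (query : String) (page_name : Option String) (folder_name : Option String), Dom_refine_query query page_name folder_name → Pre_refine_query query page_name folder_name → Spec_refine_query query page_name folder_name (refine_query query page_name folder_name)

-- ===== LEMMAS AND PROOFS =====

-- dedupe relative to an already-seen set (characterises PySem.List.dedup's foldl)
def pvD : List String → PySem.Set String → List String
  | [], _ => []
  | w :: t, seen =>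
    if PySem.Set.contains seen w then pvD t seen else w :: pvD t (PySem.Set.add seen w)

-- head-filter dedupe: pvPick without the budget
def pvFD : List String → List String
  | [] => []
  | h :: t => h :: pvFD (t.filter (fun w => w ≠ h))
termination_by l => l.length
decreasing_by
  simp only [List.length_unattach, List.length_cons]
  exact Nat.lt_succ_of_le (le_trans (List.length_filter_le _ _) (by simp))

theorem pvFoldl_add_eq (l : List String) : ∀ seen : PySem.Set String,
    l.foldl PySem.Set.add seen = seen ++ pvD l seen := by
  induction l with
  | nil => intro seen; simp [pvD]
  | cons w t ih =>
    intro seen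
    by_cases h : w ∈ seen
    · simp [pvD, List.foldl, h, ih]
    · simp [pvD, List.foldl, h, ih]

theorem pvDedup_eq (l : List String) : PySem.List.dedup l = pvD l PySem.Set.empty := by
  have := pvFoldl_add_eq l PySem.Set.empty
  simp [PySem.Set.empty] at this
  simp [PySem.List.dedup_eq_ofList, PySem.Set.ofList_eq_foldl, this, PySem.Set.empty]

-- pvD only looks at MEMBERSHIP of the seen set
theorem pvD_congr (l : List String) : ∀ s1 s2 : PySem.Set String,
    (∀ w, w ∈ s1 ↔ w ∈ s2) → pvD l s1 = pvD l s2 := by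
  induction l with
  | nil => intro s1 s2 _; simp [pvD]
  | cons w t ih =>
    intro s1 s2 hmem
    by_cases h : w ∈ s1
    · simp [pvD, h, (hmem w).mp h, ih s1 s2 hmem]
    · have h2 : ¬ w ∈ s2 := fun hx => h ((hmem w).mpr hx)
      have hmem' : ∀ v, v ∈ (s1 ++ [w] : PySem.Set String) ↔ v ∈ (s2 ++ [w] : PySem.Set String) := by
        intro v; simp only [List.mem_append]; rw [hmem v]
      simp [pvD, h, h2]
      exact ih _ _ hmem'

-- adding x to seen = filtering x out of the rest
theorem pvD_add (l : List String) : ∀ (seen : PySem.Set String) (x : String),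
    pvD l (PySem.Set.add seen x) = pvD (l.filter (fun w => w ≠ x)) seen := by
  induction l with
  | nil => intro seen x; simp [pvD]
  | cons h t ih =>
    intro seen x
    by_cases hx : h = x
    · subst hx
      simp [pvD, List.filter, PySem.Set.mem_add, ih]
    · by_cases hs : h ∈ seen
      · simp [pvD, List.filter, hx, hs, PySem.Set.mem_add, ih]
      · have hna : ¬ h ∈ PySem.Set.add seen x := by
          simp [PySem.Set.mem_add, hx, hs]
        have hcg : ∀ v, v ∈ PySem.Set.add (PySem.Set.add seen x) h ↔
            v ∈ PySem.Set.add (PySem.Set.add seen h) x := by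
          intro v; simp [PySem.Set.mem_add]; tauto
        have step : pvD (h :: t) (PySem.Set.add seen x) =
            h :: pvD t (PySem.Set.add (PySem.Set.add seen x) h) := by
          simp [pvD, hna]
        have stepR : pvD ((h :: t).filter (fun w => w ≠ x)) seen =
            h :: pvD (t.filter (fun w => w ≠ x)) (PySem.Set.add seen h) := by
          simp [List.filter, hx, pvD, hs]
        rw [step, stepR, pvD_congr t _ _ hcg]
        exact congrArg _ (ih (PySem.Set.add seen h) x)

theorem pvD_empty_eq_pvFD : ∀ (n : Nat) (l : List String), l.length ≤ n →
    pvD l PySem.Set.empty = pvFD l := by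
  intro n
  induction n with
  | zero =>
    intro l hl
    cases l with
    | nil => simp [pvD, pvFD]
    | cons h t => simp at hl
  | succ n ih =>
    intro l hl
    cases l with
    | nil => simp [pvD, pvFD]
    | cons h t =>
      have hlen : (t.filter (fun w => w ≠ h)).length ≤ n := by
        have := List.length_filter_le (fun w => w ≠ h) t
        simp at hl; omega
      have hadd : pvD (h :: t) PySem.Set.empty =
          h :: pvD t (PySem.Set.add PySem.Set.empty h) := by
        simp [pvD, PySem.Set.empty]
      rw [pvFD, hadd, pvD_add]
      exact congrArg _ (ih _ hlen)

theorem pvPick_eq_take : ∀ (n : Nat) (l : List String) (k : Nat), l.length ≤ n →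
    pvPick l k = List.take k (pvFD l) := by
  intro n
  induction n with
  | zero =>
    intro l k hl
    cases l with
    | nil => cases k <;> simp [pvPick, pvFD]
    | cons h t => simp at hl
  | succ n ih =>
    intro l k hl
    cases l with
    | nil => cases k <;> simp [pvPick, pvFD]
    | cons h t =>
      cases k with
      | zero => simp [pvPick]
      | succ k =>
        have hlen : (t.filter (fun w => w ≠ h)).length ≤ n := by
          have := List.length_filter_le (fun w => w ≠ h) t
          simp at hl; omega
        rw [pvPick, pvFD, List.take_succ_cons]
        exact congrArg _ (ih _ k hlen)

-- A's per-name extension equals appending B's extra words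
theorem pvCtxAddA_eq (name? : Option String) (words : List String) :
    pvCtxAddA name? words = words ++ pvExtra name? := by
  cases name? with
  | none => simp [pvCtxAddA, pvExtra]
  | some s =>
    unfold pvCtxAddA pvExtra
    by_cases h : s = ""
    · simp [h]
    · simp only [if_neg h, PySem.Dict.getD]
      cases PySem.Dict.get? pvCtx ((PySem.Str.split₀ (PySem.Str.lower s)).headD "") <;> simp

-- ===== VERDICT (by name: the statement is the Claim_ definition above) =====
theorem refine_query_spec : Claim_equal_refine_query := by
  intro query page_name folder_name _ _
  unfold Spec_refine_query refine_query refine_query_alt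
  simp only [pvCtxAddA_eq]
  set stream := ((PySem.Str.split₀ query).map PySem.Str.lower).filter
      (fun w => !(PySem.Set.contains pvStopWords w)) ++ pvExtra page_name ++ pvExtra folder_name
  rw [PySem.List.slice_to _ (by norm_num), pvDedup_eq,
    pvD_empty_eq_pvFD stream.length stream le_rfl,
    pvPick_eq_take stream.length stream 5 le_rfl]
  rfl
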